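-- pv_equiv track=rewrite | github.com/tr1503/LeetCode | Binary Search/longestRepeatingSubstring.py | search
-- ===== SOURCE A (Python) =====
-- def search(L, n, S):
--     visited = set()
--     for i in range(n - L + 1):
--         temp = S[i:i+L]
--         if temp in visited:
--             return i
--         visited.add(temp)
--     return -1
-- ===== SOURCE B (Python) =====
-- def search(L, n, S):
--     return next((i for i in range(n - L + 1)
--                  if any(S[j:j+L] == S[i:i+L] for j in range(i))), -1)
-- ===== Notes on version B (the rewrite author's own statement) =====
-- stated objective: alternative
-- what changed: B drops A's growing hash set and its imperative loop entirely: it is a single find-first expression over the range whose predicate re-scans all earlier positions comparing substrings directly (brute-force re-scan instead of set membership).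
import Mathlib
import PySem

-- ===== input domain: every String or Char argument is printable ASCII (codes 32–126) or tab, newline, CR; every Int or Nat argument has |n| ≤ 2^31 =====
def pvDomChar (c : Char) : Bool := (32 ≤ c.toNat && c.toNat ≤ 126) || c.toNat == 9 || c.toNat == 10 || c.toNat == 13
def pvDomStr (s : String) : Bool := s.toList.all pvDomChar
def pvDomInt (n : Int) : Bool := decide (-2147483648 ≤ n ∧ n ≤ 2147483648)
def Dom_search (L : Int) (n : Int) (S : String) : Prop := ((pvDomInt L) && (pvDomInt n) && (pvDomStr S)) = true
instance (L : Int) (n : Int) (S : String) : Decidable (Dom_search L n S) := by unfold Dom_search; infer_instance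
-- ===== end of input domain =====

-- B drops A's growing hash set and its imperative loop: it is a single find-first expression whose predicate re-scans all earlier positions directly ('alternative', no speed claim).

-- ===== PORT A =====
-- for i in range(n-L+1): temp = S[i:i+L]; if temp in visited: return i; visited.add(temp)
def searchA_loop (L : Int) (S : String) : Nat → Int → PySem.Set String → Int
  | 0, _, _ => -1
  | k+1, i, visited =>
    let temp := PySem.Str.slice S (some i) (some (i+L))
    if visited.contains temp then i
    else searchA_loop L S k (i+1) (visited.add temp)

def search (L : Int) (n : Int) (S : String) : Int :=
  searchA_loop L S (n - L + 1).toNat 0 PySem.Set.empty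

-- ===== PORT B =====
-- the lazy generator scan of next(...): yield the current index when some earlier j matches, else advance
def searchB_find (L : Int) (m : Int) (S : String) (i : Int) : Option Int :=
  if h : i < m then
    if (PySem.List.pyRange 0 i 1).any
        (fun j => PySem.Str.slice S (some j) (some (j+L)) == PySem.Str.slice S (some i) (some (i+L))) then
      some i
    else searchB_find L m S (i+1)
  else none
termination_by (m - i).toNat
decreasing_by omega

-- next((i for i in range(n-L+1) if any(S[j:j+L] == S[i:i+L] for j in range(i))), -1)
def search_alt (L : Int) (n : Int) (S : String) : Int :=
  match searchB_find L (n - L + 1) S 0 with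
  | some i => i
  | none => -1

-- ===== PRECONDITION & SPEC =====
def Spec_search (L : Int) (n : Int) (S : String) (out : Int) : Prop := out = search_alt L n S
instance (L : Int) (n : Int) (S : String) (out : Int) : Decidable (Spec_search L n S out) := by unfold Spec_search; infer_instance

-- ===== CLAIM =====
def Claim_equal_search : Prop := ∀ (L : Int) (n : Int) (S : String), Dom_search L n S → Spec_search L n S (search L n S)

-- ===== LEMMAS AND PROOFS =====

-- A's early-exit loop with fuel k from position i is B's generator scan from i (when the fuel
-- reaches exactly the range end m), under the invariant that 'visited' holds exactly the
-- substrings at positions before i.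
theorem searchA_loop_eq (L : Int) (S : String) (m : Int) :
    ∀ (k : Nat) (i : Int) (visited : PySem.Set String), 0 ≤ i → i + k = m →
    (∀ t, visited.contains t =
      (PySem.List.pyRange 0 i 1).any (fun j => PySem.Str.slice S (some j) (some (j+L)) == t)) →
    searchA_loop L S k i visited =
      (match searchB_find L m S i with
        | some x => x
        | none => -1) := by
  intro k
  induction k with
  | zero =>
    intro i visited _ hm _
    rw [searchB_find, dif_neg (by omega)]
    rfl
  | succ k ih =>
    intro i visited h0 hm hinv
    rw [searchB_find, dif_pos (by omega)]
    simp only [searchA_loop, hinv]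
    by_cases hcond :
      (PySem.List.pyRange 0 i 1).any
        (fun j => PySem.Str.slice S (some j) (some (j+L)) == PySem.Str.slice S (some i) (some (i+L))) = true
    · rw [if_pos hcond, if_pos hcond]
    · rw [if_neg hcond, if_neg hcond]
      apply ih (i+1) _ (by omega) (by omega)
      intro t
      rw [Bool.eq_iff_iff, PySem.Set.contains_iff, PySem.Set.mem_add,
          ← PySem.Set.contains_iff, hinv t,
          PySem.List.pyRange_one_succ_right h0]
      simp only [List.any_append, List.any_cons, List.any_nil, Bool.or_false,
        Bool.or_eq_true, beq_iff_eq, @eq_comm String t]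

-- ===== VERDICT =====
theorem search_spec : Claim_equal_search := by
  intro L n S _
  unfold Spec_search search search_alt
  by_cases hm : 0 ≤ n - L + 1
  · rw [searchA_loop_eq L S (n - L + 1) ((n - L + 1).toNat) 0 PySem.Set.empty le_rfl (by omega)
      (by
        intro t
        rw [PySem.List.pyRange_one_eq_nil le_rfl]
        rfl)]
  · rw [show (n - L + 1).toNat = 0 by omega, searchB_find, dif_neg (by omega)]
    rfl
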